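-- pv_equiv track=rewrite | github.com/cmorganl/MeatLoaf | metag_summarizer.py | bin_classes
-- ===== SOURCE A (Python) =====
-- def bin_classes(taxa_abund: dict, positives: set, total_queries: int) -> (int, int, int, int):
--     """
--     Sorts the classifications into the four classes: true/false positives and true/false negatives
--     TP - taxa in positives
--     FP - taxa not in false positives
--     FN - taxa that were not classified
--     TN - 0
--
--     :param taxa_abund: A dictionary mapping an organism name to its number of classifications
--     :param positives: A list of expected organisms
--     :param total_queries: The total number of query sequences that should have been classified (as positives)
--     :return:
--     """
--     tp = 0
--     fp = 0
--     for k, v in taxa_abund.items():  # type: (str, int)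
--         if k in positives:
--             tp += v
--         else:
--             fp += v
--
--     fn = total_queries - (tp + fp)
--     tn = 0
--
--     return tp, fp, tn, fn
-- ===== SOURCE B (Python) =====
-- def bin_classes(taxa_abund: dict, positives: set, total_queries: int) -> (int, int, int, int):
--     total = sum(taxa_abund.values())
--     tp = sum(taxa_abund.get(k, 0) for k in positives)
--     return tp, total - tp, 0, total_queries - total
-- ===== Notes on version B (the rewrite author's own statement) =====
-- stated objective: alternative
-- what changed: B drops A's single branching pass over the dict items: it sums all values once, sums lookups over the positives set for tp, and derives fp and fn by subtraction.
import Mathlib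
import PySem

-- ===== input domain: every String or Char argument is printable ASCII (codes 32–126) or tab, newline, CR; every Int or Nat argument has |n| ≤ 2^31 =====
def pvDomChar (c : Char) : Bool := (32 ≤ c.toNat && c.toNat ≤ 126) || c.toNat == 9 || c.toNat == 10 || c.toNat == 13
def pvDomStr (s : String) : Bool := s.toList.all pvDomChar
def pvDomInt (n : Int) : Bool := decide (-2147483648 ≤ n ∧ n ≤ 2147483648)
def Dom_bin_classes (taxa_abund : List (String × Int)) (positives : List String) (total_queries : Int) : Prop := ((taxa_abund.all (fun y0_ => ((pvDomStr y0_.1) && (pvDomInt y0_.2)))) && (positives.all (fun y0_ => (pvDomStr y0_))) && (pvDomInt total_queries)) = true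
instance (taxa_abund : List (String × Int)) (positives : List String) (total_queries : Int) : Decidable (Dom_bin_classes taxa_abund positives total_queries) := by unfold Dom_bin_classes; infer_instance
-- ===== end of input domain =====

-- B replaces A's branching tp/fp pass with a values total plus a lookup-sum over positives, deriving fp and fn by subtraction (alternative decomposition, same cost).


-- ===== PORT A =====
def bin_classes (taxa_abund : List (String × Int)) (positives : List String) (total_queries : Int) : Int × Int × Int × Int :=
  -- tp = 0; fp = 0; for k, v in taxa_abund.items(): if k in positives: tp += v else: fp += v
  let tpfp := taxa_abund.foldl
    (fun (acc : Int × Int) kv =>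
      if positives.contains kv.1 then (acc.1 + kv.2, acc.2) else (acc.1, acc.2 + kv.2))
    (0, 0)
  let fn := total_queries - (tpfp.1 + tpfp.2)
  let tn : Int := 0
  (tpfp.1, tpfp.2, tn, fn)

-- ===== PORT B =====
-- exact port of Python's taxa_abund.get(k, 0): first match in insertion order, default 0
def lookupD (taxa_abund : List (String × Int)) (k : String) : Int :=
  match taxa_abund with
  | [] => 0
  | (k', v) :: rest => if k' == k then v else lookupD rest k

def bin_classes_alt (taxa_abund : List (String × Int)) (positives : List String) (total_queries : Int) : Int × Int × Int × Int :=
  let total := (taxa_abund.map Prod.snd).sum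
  let tp := (positives.map (fun k => lookupD taxa_abund k)).sum
  (tp, total - tp, 0, total_queries - total)

-- ===== PRECONDITION & SPEC =====
-- Pre_ only requires what the Python types guarantee anyway: a dict has no duplicate
-- keys and a set has no duplicate elements; no genuine Python input is excluded.
def Pre_bin_classes (taxa_abund : List (String × Int)) (positives : List String) (total_queries : Int) : Prop :=
  (taxa_abund.map Prod.fst).Nodup ∧ positives.Nodup
instance (taxa_abund : List (String × Int)) (positives : List String) (total_queries : Int) : Decidable (Pre_bin_classes taxa_abund positives total_queries) := by unfold Pre_bin_classes; infer_instance

def pvWitness_bin_classes : (List (String × Int)) × List String × Int :=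
  ([("a", 3), ("b", 2)], ["a", "c"], 10)

def Spec_bin_classes (taxa_abund : List (String × Int)) (positives : List String) (total_queries : Int) (out : Int × Int × Int × Int) : Prop := out = bin_classes_alt taxa_abund positives total_queries
instance (taxa_abund : List (String × Int)) (positives : List String) (total_queries : Int) (out : Int × Int × Int × Int) : Decidable (Spec_bin_classes taxa_abund positives total_queries out) := by unfold Spec_bin_classes; infer_instance

-- ===== CLAIM (what is proved, stated in full; the proofs are below) =====
def Claim_equal_bin_classes : Prop := ∀ (taxa_abund : List (String × Int)) (positives : List String) (total_queries : Int), Dom_bin_classes taxa_abund positives total_queries → Pre_bin_classes taxa_abund positives total_queries → Spec_bin_classes taxa_abund positives total_queries (bin_classes taxa_abund positives total_queries)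

-- ===== LEMMAS AND PROOFS =====

-- sum of abundances over items whose key is a positive
def tpSum (positives : List String) (taxa_abund : List (String × Int)) : Int :=
  ((taxa_abund.filter (fun kv => positives.contains kv.1)).map Prod.snd).sum

-- A's fold, characterised: tp accumulates the filtered sum, fp the rest
theorem foldA_eq (positives : List String) (taxa_abund : List (String × Int)) :
    ∀ init : Int × Int,
      taxa_abund.foldl
        (fun (acc : Int × Int) kv =>
          if positives.contains kv.1 then (acc.1 + kv.2, acc.2) else (acc.1, acc.2 + kv.2))
        init
      = (init.1 + tpSum positives taxa_abund,
         init.2 + ((taxa_abund.map Prod.snd).sum - tpSum positives taxa_abund)) := by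
  induction taxa_abund with
  | nil => intro init; simp [tpSum]
  | cons kv rest ih =>
    intro init
    by_cases h : positives.contains kv.1
    · simp only [List.foldl_cons, h, if_pos, ih, tpSum, List.filter_cons, List.map_cons,
        List.sum_cons]
      simp
      ring
    · simp only [List.foldl_cons, h, ih, tpSum, List.filter_cons, List.map_cons,
        List.sum_cons]
      simp
      ring

theorem lookupD_not_mem (taxa_abund : List (String × Int)) (k : String)
    (h : k ∉ taxa_abund.map Prod.fst) : lookupD taxa_abund k = 0 := by
  induction taxa_abund with
  | nil => rfl
  | cons kv rest ih =>
    obtain ⟨k', v⟩ := kv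
    simp only [List.map_cons, List.mem_cons, not_or] at h
    show (if k' == k then v else lookupD rest k) = 0
    rw [if_neg (by simp only [beq_iff_eq]; exact Ne.symm h.1), ih h.2]

theorem sum_indicator (positives : List String) (k : String) (v : Int)
    (hnd : positives.Nodup) :
    (positives.map (fun p => if k == p then v else 0)).sum
      = if positives.contains k then v else 0 := by
  induction positives with
  | nil => rfl
  | cons p rest ih =>
    simp only [List.nodup_cons] at hnd
    simp only [List.map_cons, List.sum_cons, List.contains_cons]
    by_cases h : k = p
    · subst h
      have h0 : (rest.map (fun q => if k == q then v else 0)).sum = 0 := by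
        apply List.sum_eq_zero
        intro x hx
        obtain ⟨q, hq, rfl⟩ := List.mem_map.mp hx
        rw [if_neg]
        simp only [beq_iff_eq]
        exact fun he => hnd.1 (he ▸ hq)
      rw [h0]
      simp
    · rw [if_neg (by simpa using h), ih hnd.2]
      simp [h]

-- B's lookup-sum over positives equals the filtered sum, given dict/set uniqueness
theorem sumLookup_eq (taxa_abund : List (String × Int)) (positives : List String)
    (hkeys : (taxa_abund.map Prod.fst).Nodup) (hpos : positives.Nodup) :
    (positives.map (fun k => lookupD taxa_abund k)).sum = tpSum positives taxa_abund := by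
  induction taxa_abund with
  | nil =>
    simp only [tpSum, List.filter_nil, List.map_nil, List.sum_nil]
    apply List.sum_eq_zero
    intro x hx
    obtain ⟨q, hq, rfl⟩ := List.mem_map.mp hx
    rfl
  | cons kv rest ih =>
    obtain ⟨k, v⟩ := kv
    simp only [List.map_cons, List.nodup_cons] at hkeys
    have hpoint : ∀ p : String,
        lookupD ((k, v) :: rest) p = (if k == p then v else 0) + lookupD rest p := by
      intro p
      by_cases h : k = p
      · subst h
        simp [lookupD, lookupD_not_mem rest k hkeys.1]
      · simp [lookupD, h]
    calc (positives.map (fun p => lookupD ((k, v) :: rest) p)).sum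
        = (positives.map (fun p => (if k == p then v else 0) + lookupD rest p)).sum := by
          simp only [hpoint]
      _ = (positives.map (fun p => if k == p then v else 0)).sum
            + (positives.map (fun p => lookupD rest p)).sum := by
          rw [← List.sum_map_add]
      _ = (if positives.contains k then v else 0) + tpSum positives rest := by
          rw [sum_indicator positives k v hpos, ih hkeys.2]
      _ = tpSum positives ((k, v) :: rest) := by
          simp only [tpSum, List.filter_cons]
          by_cases h : k ∈ positives <;> simp [h]

-- ===== VERDICT (by name: the statement is the Claim_ definition above) =====
theorem bin_classes_spec : Claim_equal_bin_classes := by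
  intro taxa_abund positives total_queries _ hpre
  obtain ⟨hkeys, hpos⟩ := hpre
  show bin_classes taxa_abund positives total_queries
      = bin_classes_alt taxa_abund positives total_queries
  unfold bin_classes bin_classes_alt
  rw [foldA_eq, sumLookup_eq taxa_abund positives hkeys hpos]
  simp
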